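-- pv_equiv track=rewrite | github.com/ahmed267115/Assignment-Cheetay-Logistics | Ques4.py | candyStoreMax
-- ===== SOURCE A (Python) =====
-- def candyStoreMax(arr, n, k):
--
--     cost = 0
--     index = 0
--     i = n-1
--     while(i >= index):
--
--         cost += arr[i]
--
--         index += k
--         i -= 1
--
--     return cost
-- ===== SOURCE B (Python) =====
-- def candyStoreMax(arr, n, k):
--     if n <= 0:
--         return 0
--     m = (n - 1) // (k + 1) + 1
--     return sum(arr[n - m:n])
-- ===== Notes on version B (the rewrite author's own statement) =====
-- stated objective: simpler
-- what changed: Replaces the twin-counter while loop with a closed-form count m = (n-1)//(k+1)+1 of chosen elements and a single slice-sum of the top block; Pre_ excludes inputs where A raises (n > len(arr), or k < 0 with n >= 1, where the loop eventually walks off the array / B would divide by zero).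
import Mathlib
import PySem

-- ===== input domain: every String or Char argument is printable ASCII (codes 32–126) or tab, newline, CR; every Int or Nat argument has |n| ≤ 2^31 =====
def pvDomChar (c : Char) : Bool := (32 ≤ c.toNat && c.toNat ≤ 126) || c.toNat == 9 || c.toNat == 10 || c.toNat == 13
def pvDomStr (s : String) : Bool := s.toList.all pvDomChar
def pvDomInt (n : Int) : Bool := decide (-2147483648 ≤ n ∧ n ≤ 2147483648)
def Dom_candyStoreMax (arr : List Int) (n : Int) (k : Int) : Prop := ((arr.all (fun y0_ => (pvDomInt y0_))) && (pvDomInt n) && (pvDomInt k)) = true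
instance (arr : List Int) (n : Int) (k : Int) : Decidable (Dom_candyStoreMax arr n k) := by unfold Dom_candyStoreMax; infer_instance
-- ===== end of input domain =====

-- B replaces A's twin-counter while loop by a closed-form count of chosen elements plus a
-- single slice-sum (simpler, loop-free counting); Pre_ excludes inputs where A raises.


-- ===== PORT A =====
-- A's while loop, state (cost, index, i); fuel n.toNat is a totality guard only:
-- under Pre_ the loop stops (i < index) within n iterations, so the fuel never cuts it.
-- Where Python's arr[i] raises IndexError (outside Pre_), pyGet? is none and we stop.
def candyStoreMaxLoop (arr : List Int) (k : Int) : Nat → Int → Int → Int → Int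
  | 0, cost, _, _ => cost
  | f + 1, cost, index, i =>
    if i ≥ index then
      match PySem.List.pyGet? arr i with
      | none => cost
      | some v => candyStoreMaxLoop arr k f (cost + v) (index + k) (i - 1)
    else cost

def candyStoreMax (arr : List Int) (n : Int) (k : Int) : Int :=
  candyStoreMaxLoop arr k n.toNat 0 0 (n - 1)

-- ===== PORT B =====
def candyStoreMax_alt (arr : List Int) (n : Int) (k : Int) : Int :=
  if n ≤ 0 then 0
  else
    let m := PySem.Int.floordiv (n - 1) (k + 1) + 1
    (PySem.List.slice arr (some (n - m)) (some n)).sum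

-- ===== PRECONDITION & SPEC =====
-- Pre_ excludes exactly the inputs on which A raises: n > len(arr) (IndexError at the first
-- access) and k < 0 with n ≥ 1 (index shrinks at least as fast as i, so the loop walks off
-- the left end of the array and raises IndexError).
def Pre_candyStoreMax (arr : List Int) (n : Int) (k : Int) : Prop :=
  n ≤ arr.length ∧ (0 ≤ k ∨ n ≤ 0)
instance (arr : List Int) (n : Int) (k : Int) : Decidable (Pre_candyStoreMax arr n k) := by
  unfold Pre_candyStoreMax; infer_instance

def pvWitness_candyStoreMax : List Int × Int × Int := ([1, 3, 5, 7], 4, 2)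

def Spec_candyStoreMax (arr : List Int) (n : Int) (k : Int) (out : Int) : Prop := out = candyStoreMax_alt arr n k
instance (arr : List Int) (n : Int) (k : Int) (out : Int) : Decidable (Spec_candyStoreMax arr n k out) := by unfold Spec_candyStoreMax; infer_instance

-- ===== CLAIM (what is proved, stated in full; the proofs are below) =====
def Claim_equal_candyStoreMax : Prop := ∀ (arr : List Int) (n : Int) (k : Int), Dom_candyStoreMax arr n k → Pre_candyStoreMax arr n k → Spec_candyStoreMax arr n k (candyStoreMax arr n k)

-- ===== LEMMAS AND PROOFS =====

-- sum of arr[lo], arr[lo+1], …, arr[lo+cnt-1], added top-first (proof helper).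
def pvBlockSum (arr : List Int) (lo : Int) : Nat → Int
  | 0 => 0
  | c + 1 => PySem.List.pyGetD arr (lo + c) 0 + pvBlockSum arr lo c

-- A's loop performs exactly r iterations and sums the block arr[i-r+1 .. i].
theorem candyStoreMaxLoop_eq_blockSum (arr : List Int) (k : Int) (hk : 0 ≤ k) :
    ∀ (r f : Nat) (cost index i : Int), r ≤ f → 0 ≤ index → i < (arr.length : Int) →
      i - index < (k + 1) * r → (0 < r → (k + 1) * ((r : Int) - 1) ≤ i - index) →
      candyStoreMaxLoop arr k f cost index i = cost + pvBlockSum arr (i + 1 - r) r := by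
  intro r
  induction r with
  | zero =>
    intro f cost index i _ _ _ hlt _
    have hlt' : i < index := by simpa using hlt
    cases f with
    | zero => simp [candyStoreMaxLoop, pvBlockSum]
    | succ f =>
      simp only [candyStoreMaxLoop, pvBlockSum]
      rw [if_neg (by omega)]
      simp
  | succ r ih =>
    intro f cost index i hrf hidx hlen hlt hge
    obtain ⟨f, rfl⟩ : ∃ f', f = f' + 1 := ⟨f - 1, by omega⟩
    have hge' : (k + 1) * (r : Int) ≤ i - index := by
      have := hge (by omega)
      push_cast at this ⊢
      linarith [this]
    have hii : index ≤ i := by nlinarith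
    have hi0 : 0 ≤ i := le_trans hidx hii
    have hcast : ((r + 1 : Nat) : Int) = (r : Int) + 1 := by push_cast; ring
    have hlt' : i - index < (k + 1) * ((r : Int) + 1) := by rw [hcast] at hlt; exact hlt
    have hring1 : (k + 1) * ((r : Int) + 1) = (k + 1) * (r : Int) + (k + 1) := by ring
    have hring2 : (k + 1) * ((r : Int) - 1) = (k + 1) * (r : Int) - (k + 1) := by ring
    simp only [candyStoreMaxLoop]
    rw [if_pos (by omega)]
    rw [PySem.List.pyGet?_eq_some_getElem (h0 := hi0) (h1 := hlen)]
    simp only []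
    rw [ih f (cost + arr[i.toNat]) (index + k) (i - 1) (by omega) (by omega) (by omega)
        (by linarith) (by intro _; linarith)]
    have hgetD : PySem.List.pyGetD arr i 0 = arr[i.toNat] :=
      PySem.List.pyGetD_eq_getElem arr 0 hi0 hlen
    have hblk : pvBlockSum arr (i + 1 - ((r + 1 : Nat) : Int)) (r + 1)
        = PySem.List.pyGetD arr i 0 + pvBlockSum arr (i - 1 + 1 - (r : Int)) r := by
      show PySem.List.pyGetD arr (i + 1 - ((r + 1 : Nat) : Int) + (r : Nat)) 0 + pvBlockSum arr (i + 1 - ((r + 1 : Nat) : Int)) r = _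
      rw [hcast]
      have e1 : i + 1 - ((r : Int) + 1) + (r : Nat) = i := by ring
      have e2 : i + 1 - ((r : Int) + 1) = i - 1 + 1 - (r : Int) := by ring
      rw [e1, e2]
    rw [hblk, hgetD]
    ring

-- B's slice-sum equals the same block sum.
theorem drop_take_sum_eq_blockSum (arr : List Int) (a : Nat) :
    ∀ (cnt : Nat), a + cnt ≤ arr.length →
      ((arr.drop a).take cnt).sum = pvBlockSum arr (a : Int) cnt
  | 0, _ => by simp [pvBlockSum]
  | c + 1, h => by
    rw [List.take_add_one, List.sum_append]
    have hc : (arr.drop a)[c]? = some (arr[a + c]'(by omega)) := by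
      rw [List.getElem?_drop]; exact List.getElem?_eq_getElem (by omega)
    rw [hc]
    simp only [Option.toList, List.sum_cons, List.sum_nil]
    have hrec := drop_take_sum_eq_blockSum arr a c (by omega)
    simp only [pvBlockSum]
    have hg : PySem.List.pyGetD arr ((a : Int) + (c : Nat)) 0 = arr[a + c]'(by omega) := by
      have hcst : ((a : Int) + (c : Nat)) = ((a + c : Nat) : Int) := by push_cast; ring
      rw [hcst, PySem.List.pyGetD_natCast]
      simp [List.getD_eq_getElem?_getD, List.getElem?_eq_getElem (show a + c < arr.length by omega)]
    rw [hg, hrec]; ring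

theorem slice_sum_eq_blockSum (arr : List Int) (lo : Int) (cnt : Nat)
    (hlo : 0 ≤ lo) (hhi : lo + cnt ≤ (arr.length : Int)) :
    (PySem.List.slice arr (some lo) (some (lo + cnt))).sum = pvBlockSum arr lo cnt := by
  obtain ⟨a, rfl⟩ : ∃ a : Nat, lo = (a : Int) := ⟨lo.toNat, by omega⟩
  rw [PySem.List.slice_natCast_add, drop_take_sum_eq_blockSum arr a cnt (by exact_mod_cast hhi)]

-- ===== VERDICT (by name: the statement is the Claim_ definition above) =====
theorem candyStoreMax_spec : Claim_equal_candyStoreMax := by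
  intro arr n k _ hpre
  obtain ⟨hlen, hk⟩ := hpre
  unfold Spec_candyStoreMax candyStoreMax candyStoreMax_alt
  by_cases hn : n ≤ 0
  · have : n.toNat = 0 := by omega
    rw [this, if_pos hn]
    rfl
  · have hk' : 0 ≤ k := by omega
    rw [if_neg hn]
    have hkpos : 0 < k + 1 := by omega
    rw [PySem.Int.floordiv_eq_ediv_of_pos hkpos]
    set q : Int := (n - 1) / (k + 1) with hq
    have hq0 : 0 ≤ q := Int.ediv_nonneg (by omega) (by omega)
    have hdm := Int.mul_ediv_add_emod (n - 1) (k + 1)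
    have hm0 : 0 ≤ (n - 1) % (k + 1) := Int.emod_nonneg _ (by omega)
    have hm1 : (n - 1) % (k + 1) < k + 1 := Int.emod_lt_of_pos _ hkpos
    have hqle : q ≤ n - 1 := Int.ediv_le_self _ (by omega)
    set m : Int := q + 1 with hmdef
    have hmn : m ≤ n := by omega
    have hm0' : 1 ≤ m := by omega
    have hcast : ((m.toNat : Int)) = m := by omega
    rw [candyStoreMaxLoop_eq_blockSum arr k hk' m.toNat n.toNat 0 0 (n - 1)
        (by omega) (by omega) (by omega)
        (by rw [hcast]; nlinarith)
        (by intro _; rw [hcast]; nlinarith)]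
    have hlo : n - 1 + 1 - ((m.toNat : Int)) = n - m := by omega
    rw [hlo]
    have hs := slice_sum_eq_blockSum arr (n - m) m.toNat (by omega) (by omega)
    rw [show n - m + ((m.toNat : Int)) = n from by omega] at hs
    show 0 + pvBlockSum arr (n - m) m.toNat = (PySem.List.slice arr (some (n - m)) (some n)).sum
    rw [hs]; ring
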